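-- pv_equiv track=rewrite | github.com/Noha1981/FibonacciPoetry | FibPoetry.py | fibo_poem
-- ===== SOURCE A (Python) =====
-- from typing import List
--
-- def fibo_poem(text: str) -> str:
--     """Teilt `text` in Zeilen, wobei die Wortanzahlen den Fibonacci-Größen folgen.
--     Die letzte Gruppe wird mit '_' aufgefüllt, falls zu wenige Wörter übrig sind."""
--     words = text.split()
--     if not words:
--         return ""
--     groups = fib_it(len(words))
--     lines = []
--     idx = 0
--     for g in groups:
--         segment = words[idx: idx + g]
--         if len(segment) < g:
--             segment = segment + ["."] * (g - len(segment))
--         lines.append(" ".join(segment))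
--         idx += g
--         if idx >= len(words):
--             break
--     return "\n".join(lines)
--
-- def fib_it(n: int) -> List[int]:
--     """Gibt eine Liste von Fibonacci-Größen zurück, so dass ihre kumulierte Summe >= n."""
--     if n <= 0:
--         return []
--     if n == 1:
--         return [1]
--     seq = [1, 1]
--     cum = 2
--     while cum < n:
--         nxt = seq[-1] + seq[-2]
--         seq.append(nxt)
--         cum += nxt
--     return seq
-- ===== SOURCE B (Python) =====
-- def fibo_poem(text: str) -> str:
--     words = text.split()
--     if not words:
--         return ""
--     # cut positions = cumulative Fibonacci sums; total = first cumulative sum >= len(words)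
--     cuts = set()
--     total = 0
--     a, b = 1, 1
--     while total < len(words):
--         total += a
--         cuts.add(total)
--         a, b = b, a + b
--     words = words + ["."] * (total - len(words))
--     pieces = []
--     for i, w in enumerate(words):
--         if i > 0:
--             pieces.append("\n" if i in cuts else " ")
--         pieces.append(w)
--     return "".join(pieces)
-- ===== Notes on version B (the rewrite author's own statement) =====
-- stated objective: alternative
-- what changed: B never slices the word list into groups: it collects the cumulative Fibonacci sums in a set of cut positions, pads the word list once up front, and then emits the output in a single enumerate pass choosing one separator per word ('\n' at a cut position, ' ' otherwise), instead of A's loop that slices a group per Fibonacci size, pads the last slice and joins per line.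
import Mathlib
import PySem

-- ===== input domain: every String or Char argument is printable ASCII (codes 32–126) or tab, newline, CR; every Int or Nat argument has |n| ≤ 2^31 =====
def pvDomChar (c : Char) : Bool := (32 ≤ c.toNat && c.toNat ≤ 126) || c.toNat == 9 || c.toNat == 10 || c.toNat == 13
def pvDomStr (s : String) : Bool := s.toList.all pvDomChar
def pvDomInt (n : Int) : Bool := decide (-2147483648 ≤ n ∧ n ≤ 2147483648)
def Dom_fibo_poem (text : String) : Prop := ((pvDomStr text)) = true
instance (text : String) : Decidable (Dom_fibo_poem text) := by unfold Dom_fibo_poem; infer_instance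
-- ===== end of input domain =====

-- B replaces A's slice-a-group-at-a-time loop by a cut-position set: it collects the cumulative
-- Fibonacci sums in a set, pads the word list once, and emits one separator per word ('\n' at a
-- cut, ' ' otherwise) in a single enumerate pass; same output, no speed claim.

-- ===== PORT A =====
-- while cum < n loop of fib_it; fuel n.toNat is enough since cum grows each turn (guard only, no algorithm change)
def pvFibLoop (n : Int) (seq : List Int) (cum : Int) : Nat → List Int
  | 0 => seq
  | fuel + 1 =>
    if cum < n then
      let nxt := (PySem.List.pyGet? seq (-1)).getD 0 + (PySem.List.pyGet? seq (-2)).getD 0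
      pvFibLoop n (seq ++ [nxt]) (cum + nxt) fuel
    else seq

def fib_it (n : Int) : List Int :=
  if n ≤ 0 then []
  else if n = 1 then [1]
  else pvFibLoop n [1, 1] 2 n.toNat

-- 'for g in groups' with the break when idx >= len(words)
def pvAFor (words : List String) (gs : List Int) (lines : List String) (idx : Int) : List String :=
  match gs with
  | [] => lines
  | g :: rest =>
    let segment := PySem.List.slice words (some idx) (some (idx + g))
    let segment := if (segment.length : Int) < g then segment ++ List.replicate (g - (segment.length : Int)).toNat "." else segment
    let lines := lines ++ [PySem.Str.join " " segment]
    if (words.length : Int) ≤ idx + g then lines else pvAFor words rest lines (idx + g)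

def fibo_poem (text : String) : String :=
  let words := PySem.Str.split₀ text
  if words = [] then ""
  else PySem.Str.join "\n" (pvAFor words (fib_it (words.length : Int)) [] 0)

-- ===== PORT B =====
-- 'while total < len(words)' loop collecting the cut positions; fuel words.length is enough since
-- total grows by a ≥ 1 each turn (guard only, no algorithm change)
def pvCuts (n : Int) (cuts : PySem.Set Int) (total a b : Int) : Nat → PySem.Set Int × Int
  | 0 => (cuts, total)
  | fuel + 1 =>
    if total < n then
      pvCuts n (PySem.Set.add cuts (total + a)) (total + a) b (a + b) fuel
    else (cuts, total)

def fibo_poem_alt (text : String) : String :=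
  let words := PySem.Str.split₀ text
  if words = [] then ""
  else
    let n : Int := (words.length : Int)
    let ct := pvCuts n PySem.Set.empty 0 1 1 words.length
    let padded := words ++ List.replicate (ct.2 - n).toNat "."
    let pieces := (PySem.List.enumerate padded 0).foldl
      (fun acc iw =>
        (if 0 < iw.1 then acc ++ [if PySem.Set.contains ct.1 iw.1 then "\n" else " "] else acc) ++ [iw.2]) []
    PySem.Str.join "" pieces

-- ===== PRECONDITION & SPEC =====
def Spec_fibo_poem (text : String) (out : String) : Prop := out = fibo_poem_alt text
instance (text : String) (out : String) : Decidable (Spec_fibo_poem text out) := by unfold Spec_fibo_poem; infer_instance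

-- ===== CLAIM (what is proved, stated in full; the proofs are below) =====
def Claim_equal_fibo_poem : Prop := ∀ (text : String), Dom_fibo_poem text → Spec_fibo_poem text (fibo_poem text)

-- ===== LEMMAS AND PROOFS =====

-- the Fibonacci group sizes, generated purely: emit a while cum < n
def pvSizes (n a b cum : Int) : Nat → List Int
  | 0 => []
  | fuel + 1 => if cum < n then a :: pvSizes n b (a + b) (cum + a) fuel else []

-- pure mirror of the values pvFibLoop appends after the seed [x, y]
def pvFibExt (n x y cum : Int) : Nat → List Int
  | 0 => []
  | fuel + 1 =>
    if cum < n then (y + x) :: pvFibExt n y (y + x) (cum + (y + x)) fuel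
    else []

-- prefix sums of the sizes, starting from t
def pvPS (t : Int) : List Int → List Int
  | [] => []
  | g :: r => (t + g) :: pvPS (t + g) r

-- the lines A builds, as take/drop chunks of the padded word list
def pvChunk : List Int → List String → List String
  | [], _ => []
  | g :: r, W => PySem.Str.join " " (W.take g.toNat) :: pvChunk r (W.drop g.toNat)

-- the per-word piece generator of B's fold
def pvGf (cuts : List Int) (iw : Int × String) : List String :=
  (if 0 < iw.1 then [if PySem.Set.contains cuts iw.1 then "\n" else " "] else []) ++ [iw.2]

-- mirror of the cut-collection in addCuts form
def pvAdd (cuts : PySem.Set Int) (total : Int) : List Int → PySem.Set Int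
  | [] => cuts
  | g :: r => pvAdd (PySem.Set.add cuts (total + g)) (total + g) r

theorem pvFibLoop_ext (n : Int) : ∀ (fuel : Nat) (s : List Int) (x y cum : Int),
    pvFibLoop n (s ++ [x, y]) cum fuel = (s ++ [x, y]) ++ pvFibExt n x y cum fuel := by
  intro fuel
  induction fuel with
  | zero => intro s x y cum; simp [pvFibLoop, pvFibExt]
  | succ f ih =>
    intro s x y cum
    by_cases h : cum < n
    · have h1 : PySem.List.pyGet? (s ++ [x, y]) (-1) = some y := by
        have e : s ++ [x, y] = (s ++ [x]) ++ [y] := by simp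
        rw [e, PySem.List.pyGet?_neg_one_append_singleton]
      have h2 : PySem.List.pyGet? (s ++ [x, y]) (-2) = some x := by
        rw [PySem.List.pyGet?_neg_ofNat (s ++ [x, y]) 2 (by omega) (by simp)]
        simp
      have e2 : (s ++ [x, y]) ++ [y + x] = (s ++ [x]) ++ [y, y + x] := by simp
      simp only [pvFibLoop, pvFibExt, h, if_pos, h1, h2, Option.getD_some, e2, ih]
      simp
    · simp [pvFibLoop, pvFibExt, h]

theorem pvFibExt_eq_sizes (n : Int) : ∀ (fuel : Nat) (x y cum : Int),
    pvFibExt n x y cum fuel = pvSizes n (x + y) (x + 2 * y) cum fuel := by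
  intro fuel
  induction fuel with
  | zero => intro x y cum; rfl
  | succ f ih =>
    intro x y cum
    by_cases h : cum < n
    · simp only [pvFibExt, pvSizes, if_pos h, ih]
      ring_nf
    · simp [pvFibExt, pvSizes, h]

theorem pvSizes_fuel (n : Int) : ∀ (f₁ f₂ : Nat) (a b cum : Int), 1 ≤ a → 1 ≤ b →
    n ≤ cum + f₁ → n ≤ cum + f₂ → pvSizes n a b cum f₁ = pvSizes n a b cum f₂ := by
  intro f₁
  induction f₁ with
  | zero =>
    intro f₂ a b cum _ _ h1 _
    have : ¬ cum < n := by omega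
    cases f₂ <;> simp [pvSizes, this]
  | succ f ih =>
    intro f₂ a b cum ha hb h1 h2
    by_cases h : cum < n
    · obtain ⟨f₂', rfl⟩ : ∃ f₂', f₂ = f₂' + 1 := by
        cases f₂ with
        | zero => exfalso; omega
        | succ m => exact ⟨m, rfl⟩
      simp only [pvSizes, if_pos h]
      rw [ih f₂' b (a + b) (cum + a) hb (by omega) (by omega) (by omega)]
    · cases f₂ <;> simp [pvSizes, h]

theorem pvSizes_pos (n : Int) : ∀ (f : Nat) (a b cum : Int), 1 ≤ a → 1 ≤ b →
    ∀ g ∈ pvSizes n a b cum f, 1 ≤ g := by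
  intro f
  induction f with
  | zero => intro a b cum _ _ g hg; simp [pvSizes] at hg
  | succ f ih =>
    intro a b cum ha hb g hg
    by_cases h : cum < n
    · simp only [pvSizes, if_pos h, List.mem_cons] at hg
      rcases hg with rfl | hg
      · exact ha
      · exact ih b (a + b) (cum + a) hb (by omega) g hg
    · simp [pvSizes, h] at hg

theorem pvSizes_sum (n : Int) : ∀ (f : Nat) (a b cum : Int), 1 ≤ a → 1 ≤ b →
    n ≤ cum + f → n ≤ cum + (pvSizes n a b cum f).sum := by
  intro f
  induction f with
  | zero => intro a b cum _ _ h; simpa [pvSizes] using h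
  | succ f ih =>
    intro a b cum ha hb h
    by_cases hc : cum < n
    · simp only [pvSizes, if_pos hc, List.sum_cons]
      have := ih b (a + b) (cum + a) hb (by omega) (by omega)
      omega
    · simp [pvSizes, hc]; omega

theorem fib_it_eq_sizes (n : Int) (h : 1 ≤ n) : fib_it n = pvSizes n 1 1 0 n.toNat := by
  by_cases h1 : n = 1
  · subst h1
    simp [fib_it, pvSizes]
  · have h2 : 2 ≤ n := by omega
    obtain ⟨f, hf⟩ : ∃ f, n.toNat = f + 2 := ⟨n.toNat - 2, by omega⟩
    unfold fib_it
    rw [if_neg (by omega), if_neg h1]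
    have := pvFibLoop_ext n n.toNat [] 1 1 2
    simp only [List.nil_append] at this
    rw [this, pvFibExt_eq_sizes]
    rw [hf]
    show [1, 1] ++ pvSizes n (1+1) (1+2*1) 2 (f + 2) = pvSizes n 1 1 0 (f + 2)
    have e1 : pvSizes n 1 1 0 (f + 2) = 1 :: 1 :: pvSizes n 2 3 2 f := by
      show pvSizes n 1 1 0 (f + 1 + 1) = _
      rw [pvSizes, if_pos (by omega)]
      rw [show (0:Int) + 1 = 1 by ring]
      rw [pvSizes, if_pos (by omega)]
      norm_num
    rw [e1, show (1:Int)+1 = 2 by ring, show (1:Int)+2*1 = 3 by ring]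
    rw [pvSizes_fuel n (f + 2) f 2 3 2 (by omega) (by omega) (by omega) (by omega)]
    norm_num

theorem pvCuts_eq (n : Int) : ∀ (f : Nat) (cuts : PySem.Set Int) (total a b : Int),
    pvCuts n cuts total a b f
      = (pvAdd cuts total (pvSizes n a b total f), total + (pvSizes n a b total f).sum) := by
  intro f
  induction f with
  | zero => intro cuts total a b; simp [pvCuts, pvSizes, pvAdd]
  | succ f ih =>
    intro cuts total a b
    by_cases h : total < n
    · simp only [pvCuts, pvSizes, if_pos h, ih, pvAdd, List.sum_cons]
      rw [Prod.mk.injEq]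
      exact ⟨rfl, by ring⟩
    · simp [pvCuts, pvSizes, pvAdd, h]

theorem pvAdd_eq_PS : ∀ (gs : List Int) (cuts : PySem.Set Int) (total : Int),
    (∀ g ∈ gs, 1 ≤ g) → (∀ x ∈ cuts, x ≤ total) → pvAdd cuts total gs = cuts ++ pvPS total gs := by
  intro gs
  induction gs with
  | nil => intro cuts total _ _; simp [pvAdd, pvPS]
  | cons g r ih =>
    intro cuts total hg hb
    have hg1 : 1 ≤ g := hg g (by simp)
    have hnm : (total + g) ∉ cuts := fun hm => by have := hb _ hm; omega
    have hadd : PySem.Set.add cuts (total + g) = cuts ++ [total + g] := by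
      simp [PySem.Set.add, PySem.Set.contains]
      intro hc
      exact absurd (by simpa using hc) hnm
    simp only [pvAdd, pvPS, hadd]
    rw [ih (cuts ++ [total + g]) (total + g) (fun x hx => hg x (by simp [hx]))
        (by intro x hx; simp at hx; rcases hx with hx | rfl
            · have := hb x hx; omega
            · omega)]
    simp

theorem pvPS_bounds : ∀ (gs : List Int) (t : Int), (∀ g ∈ gs, 1 ≤ g) →
    ∀ x ∈ pvPS t gs, t < x ∧ x ≤ t + gs.sum := by
  intro gs
  induction gs with
  | nil => intro t _ x hx; simp [pvPS] at hx
  | cons g r ih =>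
    intro t hg x hx
    have hg1 : 1 ≤ g := hg g (by simp)
    have hr : ∀ y ∈ r, 1 ≤ y := fun y hy => hg y (by simp [hy])
    simp only [pvPS, List.mem_cons] at hx
    rcases hx with rfl | hx
    · have : 0 ≤ r.sum := List.sum_nonneg (fun y hy => by have := hr y hy; omega)
      simp [List.sum_cons]; omega
    · have := ih (t + g) hr x hx
      simp [List.sum_cons]; omega

-- A's loop produces exactly the chunk lines of the padded list
theorem pvAFor_chunk (words : List String) (dcount : Nat) :
    ∀ (f : Nat) (a b cum : Int) (lines : List String), 1 ≤ a → 1 ≤ b → 0 ≤ cum →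
    ((words.length : Int) + dcount = cum + (pvSizes (words.length : Int) a b cum f).sum) →
    pvAFor words (pvSizes (words.length : Int) a b cum f) lines cum
      = lines ++ pvChunk (pvSizes (words.length : Int) a b cum f)
          ((words ++ List.replicate dcount ".").drop cum.toNat) := by
  intro f
  induction f with
  | zero => intro a b cum lines _ _ _ _; simp [pvSizes, pvAFor, pvChunk]
  | succ f ih =>
    intro a b cum lines ha hb hcum hlen
    set n : Int := (words.length : Int) with hn
    by_cases hc : cum < n
    · rw [pvSizes, if_pos hc] at hlen ⊢
      have hcumle : cum.toNat ≤ words.length := by omega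
      have hdrop : (words ++ List.replicate dcount (".":String)).drop cum.toNat
          = words.drop cum.toNat ++ List.replicate dcount "." := List.drop_append_of_le_length hcumle
      have hslice : PySem.List.slice words (some cum) (some (cum + a))
          = (words.drop cum.toNat).take a.toNat := by
        rw [PySem.List.slice_toNat words hcum (by omega)]
        congr 1
        omega
      have hdl : (words.drop cum.toNat).length = words.length - cum.toNat := List.length_drop
      by_cases hbreak : n ≤ cum + a
      · -- last group: the break fires and the rest of the sizes is empty
        have hrest : pvSizes n b (a + b) (cum + a) f = [] := by
          cases f with
          | zero => rfl
          | succ m => rw [pvSizes, if_neg (by omega)]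
        rw [hrest] at hlen ⊢
        simp only [List.sum_cons, List.sum_nil, add_zero] at hlen
        have hseg : (words.drop cum.toNat).take a.toNat = words.drop cum.toNat := by
          apply List.take_of_length_le
          omega
        have hlenseg : ((words.drop cum.toNat).length : Int) = n - cum := by
          rw [hdl]; omega
        simp only [pvAFor, hslice, hseg]
        rw [if_pos (show n ≤ cum + a from hbreak)]
        simp only [pvChunk, hdrop]
        have htake : (words.drop cum.toNat ++ List.replicate dcount (".":String)).take a.toNat
            = words.drop cum.toNat ++ List.replicate dcount "." := by
          apply List.take_of_length_le
          simp [hdl]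
          omega
        rw [htake]
        by_cases hpad : ((words.drop cum.toNat).length : Int) < a
        · rw [if_pos hpad]
          have : ((a - ((words.drop cum.toNat).length : Int)).toNat) = dcount := by omega
          rw [this]
        · rw [if_neg hpad]
          have hd0 : dcount = 0 := by omega
          subst hd0
          simp
      · -- middle group: full segment, no break, recurse
        have hseglen : ((words.drop cum.toNat).take a.toNat).length = a.toNat := by
          rw [List.length_take]
          omega
        simp only [pvAFor, hslice]
        rw [if_neg (show ¬ (((words.drop cum.toNat).take a.toNat).length : Int) < a by rw [hseglen]; omega)]
        rw [if_neg (show ¬ n ≤ cum + a from hbreak)]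
        rw [ih b (a + b) (cum + a) (lines ++ [PySem.Str.join " " ((words.drop cum.toNat).take a.toNat)])
            hb (by omega) (by omega) (by simp at hlen ⊢; omega)]
        simp only [pvChunk, hdrop]
        have htake : (words.drop cum.toNat ++ List.replicate dcount (".":String)).take a.toNat
            = (words.drop cum.toNat).take a.toNat := by
          apply List.take_append_of_le_length
          omega
        have hdrop2 : (words.drop cum.toNat ++ List.replicate dcount (".":String)).drop a.toNat
            = (words ++ List.replicate dcount ".").drop (cum + a).toNat := by
          rw [← hdrop, List.drop_drop]
          congr 1
          omega
        rw [htake, hdrop2]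
        simp
    · rw [pvSizes, if_neg hc]
      simp [pvAFor, pvChunk]

-- Chars.join [] concatenates
theorem joinNil_append (xs ys : List (List Char)) :
    PySem.Chars.join [] (xs ++ ys) = PySem.Chars.join [] xs ++ PySem.Chars.join [] ys := by
  induction xs with
  | nil => simp [PySem.Chars.join_nil]
  | cons p ps ih =>
    cases ps with
    | nil =>
      cases ys with
      | nil => simp [PySem.Chars.join_nil, PySem.Chars.join_singleton]
      | cons q qs =>
        rw [List.singleton_append, PySem.Chars.join_cons_cons, PySem.Chars.join_singleton]
        simp
    | cons p2 ps2 =>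
      rw [List.cons_append, List.cons_append, PySem.Chars.join_cons_cons,
          PySem.Chars.join_cons_cons, ← List.cons_append, ih]
      simp

-- interior words of a chunk: every index avoids the cut set, so each gets a ' ' separator
theorem pvInner (cuts : List Int) : ∀ (ws : List String) (j : Int), 0 < j →
    (∀ i : Int, j ≤ i → i < j + ws.length → i ∉ cuts) →
    PySem.Chars.join [] (((PySem.List.enumerate ws j).flatMap (pvGf cuts)).map String.toList)
      = ws.flatMap (fun w => ' ' :: w.toList) := by
  intro ws
  induction ws with
  | nil => intro j _ _; simp [PySem.List.enumerate, PySem.Chars.join_nil]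
  | cons w ws ih =>
    intro j hj hout
    have hnm : j ∉ cuts := hout j (le_refl _) (by simp only [List.length_cons]; push_cast; omega)
    have hc : PySem.Set.contains cuts j = false := by
      simp [PySem.Set.contains]
      intro h
      exact absurd (List.contains_iff_mem.mp (by simpa using h)) hnm
    rw [PySem.List.enumerate_cons]
    rw [List.flatMap_cons]
    simp only [pvGf, if_pos hj, hc]
    rw [List.map_append, joinNil_append]
    rw [ih (j + 1) (by omega) (by intro i h1 h2; exact hout i (by omega) (by simp at h2 ⊢; omega))]
    show PySem.Chars.join [] [String.toList " ", String.toList w] ++ _ = _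
    rw [PySem.Chars.join_cons_cons, PySem.Chars.join_singleton]
    simp

theorem join_space_eq (c0 : String) (ws : List String) :
    PySem.Chars.join [' '] ((c0 :: ws).map String.toList)
      = c0.toList ++ ws.flatMap (fun w => ' ' :: w.toList) := by
  induction ws generalizing c0 with
  | nil => simp [PySem.Chars.join_singleton]
  | cons w ws ih =>
    rw [List.map_cons, List.map_cons, PySem.Chars.join_cons_cons]
    rw [← List.map_cons, ih w]
    simp

-- one chunk: leading '\n' at the cut (if not at position 0), words joined by ' '
theorem pvChunkPiece (cuts : List Int) (c : List String) (k : Nat) (hc : c ≠ [])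
    (hk : 0 < k → (k : Int) ∈ cuts)
    (hin : ∀ i : Int, (k : Int) < i → i < (k : Int) + c.length → i ∉ cuts) :
    PySem.Chars.join [] (((PySem.List.enumerate c (k : Int)).flatMap (pvGf cuts)).map String.toList)
      = (if 0 < k then ['\n'] else []) ++ PySem.Chars.join [' '] (c.map String.toList) := by
  obtain ⟨w, ws, rfl⟩ : ∃ w ws, c = w :: ws := by
    cases c with
    | nil => exact absurd rfl hc
    | cons a l => exact ⟨a, l, rfl⟩
  rw [PySem.List.enumerate_cons, List.flatMap_cons]
  have hinner : PySem.Chars.join [] (((PySem.List.enumerate ws ((k:Int) + 1)).flatMap (pvGf cuts)).map String.toList)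
      = ws.flatMap (fun w => ' ' :: w.toList) := by
    apply pvInner cuts ws ((k:Int)+1) (by omega)
    intro i h1 h2
    exact hin i (by omega) (by simp; omega)
  rw [List.map_append, joinNil_append, hinner, join_space_eq]
  by_cases hk0 : 0 < k
  · have hmem : PySem.Set.contains cuts (k : Int) = true := by
      simp [PySem.Set.contains]
      exact List.contains_iff_mem.mpr (hk hk0) |> fun h => by simpa using h
    simp only [pvGf, if_pos (by exact_mod_cast hk0 : (0:Int) < (k:Int)), hmem, if_pos]
    rw [if_pos hk0]
    show PySem.Chars.join [] [String.toList "\n", String.toList w] ++ _ = _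
    rw [PySem.Chars.join_cons_cons, PySem.Chars.join_singleton]
    simp
  · have hkz : k = 0 := by omega
    subst hkz
    simp only [pvGf]
    rw [if_neg (by simp), if_neg (by omega)]
    show PySem.Chars.join [] [String.toList w] ++ _ = _
    rw [PySem.Chars.join_singleton]
    simp

-- B's single pass equals the '\n'-joined chunk lines
theorem pvB_main (cuts : List Int) : ∀ (gs : List Int) (k : Nat) (W : List String),
    (∀ g ∈ gs, 1 ≤ g) → ((W.length : Int) = gs.sum) → gs ≠ [] →
    (0 < k → (k : Int) ∈ cuts) →
    (∀ i : Int, (k : Int) < i → i < (k : Int) + gs.sum → (i ∈ cuts ↔ i ∈ pvPS (k : Int) gs)) →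
    PySem.Chars.join [] (((PySem.List.enumerate W (k : Int)).flatMap (pvGf cuts)).map String.toList)
      = (if 0 < k then ['\n'] else [])
        ++ PySem.Chars.join ['\n'] ((pvChunk gs W).map String.toList) := by
  intro gs
  induction gs with
  | nil => intro k W _ _ hne _ _; exact absurd rfl hne
  | cons a rest ih =>
    intro k W hpos hlen hne hk hiff
    have ha : 1 ≤ a := hpos a (by simp)
    have hrpos : ∀ g ∈ rest, 1 ≤ g := fun g hg => hpos g (by simp [hg])
    have hrsum : 0 ≤ rest.sum := List.sum_nonneg (fun g hg => by have := hrpos g hg; omega)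
    have hsum : ((a :: rest).sum : Int) = a + rest.sum := by simp
    have haleW : a.toNat ≤ W.length := by simp [hsum] at hlen; omega
    have hclen : (W.take a.toNat).length = a.toNat := by
      rw [List.length_take]; omega
    have hW : W = W.take a.toNat ++ W.drop a.toNat := (List.take_append_drop _ _).symm
    have hcne : W.take a.toNat ≠ [] := by
      intro h
      have := congrArg List.length h
      simp [hclen] at this
      omega
    -- the head chunk's piece
    have hin1 : ∀ i : Int, (k : Int) < i → i < (k : Int) + (W.take a.toNat).length → i ∉ cuts := by
      intro i h1 h2 hmem
      have h2' : i < (k : Int) + a := by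
        rw [hclen] at h2; omega
      have := (hiff i h1 (by simp [hsum]; omega)).mp hmem
      simp only [pvPS, List.mem_cons] at this
      rcases this with rfl | hmem2
      · omega
      · have := pvPS_bounds rest ((k:Int) + a) hrpos i hmem2
        omega
    have hpiece := pvChunkPiece cuts (W.take a.toNat) k hcne hk hin1
    conv_lhs => rw [hW]
    rw [PySem.List.enumerate_append, List.flatMap_append, List.map_append, joinNil_append, hpiece, hclen]
    cases rest with
    | nil =>
      have hW' : W.drop a.toNat = [] := by
        apply List.eq_nil_of_length_eq_zero
        rw [List.length_drop]
        simp at hlen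
        omega
      rw [hW']
      simp only [PySem.List.enumerate, List.flatMap_nil, List.map_nil, PySem.Chars.join_nil, List.append_nil]
      simp only [pvChunk, List.map_cons, List.map_nil, PySem.Chars.join_singleton]
      rw [show (PySem.Str.join " " (W.take a.toNat)).toList = PySem.Chars.join [' '] ((W.take a.toNat).map String.toList) by simp [PySem.Str.join]]
    | cons r rs =>
      have hsum' : ((r :: rs).sum : Int) = r + rs.sum := by simp
      have hrs1 : 1 ≤ r := hrpos r (by simp)
      have hrssum : 0 ≤ rs.sum := List.sum_nonneg (fun g hg => by have := hrpos g (by simp [hg]); omega)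
      have hlen' : ((W.drop a.toNat).length : Int) = (r :: rs).sum := by
        rw [List.length_drop]
        simp [hsum] at hlen ⊢
        omega
      have hkcast : ((k + a.toNat : Nat) : Int) = (k : Int) + a := by push_cast; omega
      have hk' : 0 < k + a.toNat → ((k + a.toNat : Nat) : Int) ∈ cuts := by
        intro _
        rw [hkcast]
        have := (hiff ((k:Int) + a) (by omega) (by simp [hsum]; omega)).mpr
        apply this
        simp [pvPS]
      have hiff' : ∀ i : Int, ((k + a.toNat : Nat) : Int) < i → i < ((k + a.toNat : Nat) : Int) + ((r :: rs).sum) →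
          (i ∈ cuts ↔ i ∈ pvPS ((k + a.toNat : Nat) : Int) (r :: rs)) := by
        intro i h1 h2
        rw [hkcast] at h1 h2 ⊢
        have := hiff i (by omega) (by simp [hsum, hsum'] at h2 ⊢; omega)
        rw [this]
        simp only [pvPS, List.mem_cons]
        constructor
        · rintro (rfl | h)
          · omega
          · exact h
        · intro h; right; exact h
      have := ih (k + a.toNat) (W.drop a.toNat) hrpos hlen' (by simp) hk' hiff'
      rw [show ((k:Int) + (a.toNat:Int)) = ((k + a.toNat : Nat) : Int) by push_cast; ring]
      rw [this, if_pos (show 0 < k + a.toNat by omega)]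
      -- assemble RHS
      simp only [pvChunk, List.map_cons]
      rw [PySem.Chars.join_cons_cons]
      rw [show (PySem.Str.join " " (W.take a.toNat)).toList = PySem.Chars.join [' '] ((W.take a.toNat).map String.toList) by simp [PySem.Str.join]]
      simp

-- ===== VERDICT (by name: the statement is the Claim_ definition above) =====
theorem fibo_poem_spec : Claim_equal_fibo_poem := by
  intro text _
  unfold Spec_fibo_poem fibo_poem fibo_poem_alt
  set words := PySem.Str.split₀ text with hw
  by_cases hnil : words = []
  · simp [hnil]
  · simp only [if_neg hnil]
    have hlen1 : 1 ≤ words.length := List.length_pos_of_ne_nil hnil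
    set n : Int := (words.length : Int) with hn
    have hn1 : 1 ≤ n := by omega
    set gs : List Int := pvSizes n 1 1 0 words.length with hgs
    have htn : n.toNat = words.length := by omega
    have hfib : fib_it n = gs := by
      rw [fib_it_eq_sizes n hn1, htn]
    have hpos : ∀ g ∈ gs, 1 ≤ g := pvSizes_pos n words.length 1 1 0 (by omega) (by omega)
    have hsum : n ≤ gs.sum := by
      have := pvSizes_sum n words.length 1 1 0 (by omega) (by omega) (by omega)
      rw [← hgs] at this
      omega
    set dcount : Nat := (gs.sum - n).toNat with hdc
    have hdci : (dcount : Int) = gs.sum - n := by omega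
    have hcuts : pvCuts n PySem.Set.empty 0 1 1 words.length = (pvPS 0 gs, gs.sum) := by
      rw [pvCuts_eq n words.length PySem.Set.empty 0 1 1]
      rw [pvAdd_eq_PS gs PySem.Set.empty 0 hpos (by intro x hx; simp [PySem.Set.empty] at hx)]
      simp [PySem.Set.empty]
      rfl
    rw [hfib, hcuts]
    set cuts : List Int := pvPS 0 gs with hcutsd
    set padded : List String := words ++ List.replicate dcount "." with hpad
    have hpadlen : (padded.length : Int) = gs.sum := by
      rw [hpad]
      simp
      omega
    -- A's loop produces the chunk lines
    have hA : pvAFor words gs [] 0 = pvChunk gs padded := by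
      have := pvAFor_chunk words dcount words.length 1 1 0 [] (by omega) (by omega) (by omega)
        (by rw [← hgs]; omega)
      rw [← hgs] at this
      simpa using this
    rw [hA]
    -- B's fold is a flatMap of per-word pieces
    have hfun : (fun (acc : List String) (iw : Int × String) =>
        (if 0 < iw.1 then acc ++ [if PySem.Set.contains cuts iw.1 then "\n" else " "] else acc) ++ [iw.2])
        = fun acc iw => acc ++ pvGf cuts iw := by
      funext acc iw
      simp only [pvGf]
      split_ifs <;> simp
    have hfold : (PySem.List.enumerate padded 0).foldl
        (fun acc iw => (if 0 < iw.1 then acc ++ [if PySem.Set.contains cuts iw.1 then "\n" else " "] else acc) ++ [iw.2]) []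
        = (PySem.List.enumerate padded 0).flatMap (pvGf cuts) := by
      rw [hfun, PySem.List.foldl_append_eq_flatMap]
      simp
    have hgne : gs ≠ [] := by
      obtain ⟨m, hm⟩ : ∃ m, words.length = m + 1 := ⟨words.length - 1, by omega⟩
      rw [hgs, hm, pvSizes, if_pos (by omega)]
      simp
    have hB := pvB_main cuts gs 0 padded hpos hpadlen hgne (by omega)
      (by intro i h1 h2; simp only [Nat.cast_zero] at h1 h2 ⊢; rw [hcutsd])
    simp only [Nat.cast_zero] at hB
    rw [if_neg (by omega)] at hB
    rw [List.nil_append] at hB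
    -- both results are ofList of the same character list
    show PySem.Str.join "\n" (pvChunk gs padded) = PySem.Str.join "" ((PySem.List.enumerate padded 0).foldl _ [])
    rw [PySem.Str.join, PySem.Str.join, hfold]
    apply congrArg String.ofList
    rw [show ("\n":String).toList = ['\n'] from rfl, show ("":String).toList = [] from rfl]
    exact hB.symm
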